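-- pv_equiv track=rewrite | github.com/shbhattacharyya/GapBridge-AI-QA | backend/main.py | _infer_modules
-- ===== SOURCE A (Python) =====
-- _SKIP_SEGMENTS = {
--     "dev", "core", "rel", "src", "bin", "obj",
--     "properties", "packages", "debug", "release",
--     # OnBase.NET top-level structural folders — not feature modules
--     "libraries", "tests", "tools", "setup", "scripts",
--     "thirdparty", "third_party", "externals", "shared",
--     "foundation", "common", "platform",
--     # Third-party JS / vendor libraries that may appear as TFS path segments
--     "jquery", "jqueryui", "angular", "angularjs", "bootstrap", "react",
--     "knockout", "lodash", "underscore", "moment", "mustache", "handlebars",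
--     "backbone", "ember", "vue", "polymer", "vendor", "bower_components",
--     "infragistics", "telerik", "devexpress", "kendo", "syncfusion",
--     "artifacts", "generated", "migrations", "dist", "build", "output",
-- }
--
-- _NS_PREFIXES = ("Hyland.", "OnBase.", "hyland.", "onbase.")
--
-- def _clean_assembly_name(name: str) -> str:
--     """Turn 'Hyland.WorkView.InterfaceServices' → 'WorkView.InterfaceServices'."""
--     for p in _NS_PREFIXES:
--         if name.startswith(p):
--             name = name[len(p):]
--             break
--     return name
--
-- def _infer_modules(paths: list) -> list:
--     """
--     Extract meaningful module/component names from TFS server paths.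
--
--     Strategy (in priority order for each path):
--     1. Assembly name — the segment that looks like a dotted namespace
--        (e.g. 'Hyland.Core.Workview.Services', 'Hyland.WorkView.InterfaceServices')
--        stripped of the 'Hyland.' prefix.
--     2. First non-structural folder after 'onbase.net/' that isn't in _SKIP_SEGMENTS.
--
--     Example inputs → outputs:
--       $/OnBase/DEV/Core/OnBase.NET/Libraries/Hyland.Core.Workview.Services/Canvas/ObjectService.cs
--         → 'Core.Workview.Services'
--       $/OnBase/DEV/Core/OnBase.NET/WorkView/Hyland.WorkView.InterfaceServices/Services/ItemListEntryService.cs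
--         → 'WorkView.InterfaceServices'
--     """
--     modules = set()
--     for path in paths:
--         normalized = path.replace("\\", "/")
--         marker = "onbase.net/"
--         idx = normalized.lower().find(marker)
--         if idx == -1:
--             # Fallback: use the last meaningful directory segment
--             parts = [s for s in normalized.split("/") if s and not s.lower().endswith(
--                 (".cs", ".xml", ".config", ".sln", ".csproj", ".json", ".md", ".resx"))]
--             if parts:
--                 modules.add(parts[-1])
--             continue
--
--         segments = [s for s in normalized[idx + len(marker):].split("/") if s]
--
--         # Pass 1 — find the first dotted-namespace assembly segment
--         assembly_found = False
--         for seg in segments: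
--             if seg.endswith((".cs", ".xml", ".config", ".sln", ".csproj",
--                              ".json", ".md", ".txt", ".resx")):
--                 break
--             if "." in seg and not seg.startswith("."):
--                 modules.add(_clean_assembly_name(seg))
--                 assembly_found = True
--                 break
--
--         if assembly_found:
--             continue
--
--         # Pass 2 — fall back to first non-structural non-file folder
--         for seg in segments:
--             low = seg.lower()
--             if low in _SKIP_SEGMENTS:
--                 continue
--             if seg.endswith((".cs", ".xml", ".config", ".sln", ".csproj",
--                              ".json", ".md", ".txt", ".resx")):
--                 break
--             modules.add(seg)
--             break
--
--     return sorted(modules)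
-- ===== SOURCE B (Python) =====
-- _SKIP_SEGMENTS = {
--     "dev", "core", "rel", "src", "bin", "obj",
--     "properties", "packages", "debug", "release",
--     "libraries", "tests", "tools", "setup", "scripts",
--     "thirdparty", "third_party", "externals", "shared",
--     "foundation", "common", "platform",
--     "jquery", "jqueryui", "angular", "angularjs", "bootstrap", "react",
--     "knockout", "lodash", "underscore", "moment", "mustache", "handlebars",
--     "backbone", "ember", "vue", "polymer", "vendor", "bower_components",
--     "infragistics", "telerik", "devexpress", "kendo", "syncfusion",
--     "artifacts", "generated", "migrations", "dist", "build", "output",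
-- }
--
-- _NS_PREFIXES = ("Hyland.", "OnBase.", "hyland.", "onbase.")
--
-- _FILE_EXTS = (".cs", ".xml", ".config", ".sln", ".csproj",
--               ".json", ".md", ".txt", ".resx")
-- _FALLBACK_EXTS = (".cs", ".xml", ".config", ".sln", ".csproj",
--                   ".json", ".md", ".resx")
--
--
-- def _strip_ns(name: str) -> str:
--     for p in _NS_PREFIXES:
--         if name.startswith(p):
--             return name[len(p):]
--     return name
--
--
-- def _module_of(path: str):
--     """One module name (or None) per path, via a single scan of the segments."""
--     normalized = path.replace("\\", "/")
--     idx = normalized.lower().find("onbase.net/")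
--     if idx == -1:
--         for seg in reversed(normalized.split("/")):
--             if seg and not seg.lower().endswith(_FALLBACK_EXTS):
--                 return seg
--         return None
--     fallback = None
--     for seg in [s for s in normalized[idx + 11:].split("/") if s]:
--         if seg.endswith(_FILE_EXTS):
--             break
--         if "." in seg and not seg.startswith("."):
--             return _strip_ns(seg)
--         if fallback is None and seg.lower() not in _SKIP_SEGMENTS:
--             fallback = seg
--     return fallback
--
--
-- def _infer_modules(paths: list) -> list:
--     return sorted({m for m in map(_module_of, paths) if m is not None})
-- ===== Notes on version B (the rewrite author's own statement) =====
-- stated objective: alternative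
-- what changed: B computes each path's single module name with one helper doing a single left-to-right scan (break on file segment, return stripped assembly, else remember first non-skip fallback) instead of A's two sequential passes, and replaces A's last-of-filtered fallback by a first-match scan of the reversed segments; the results are collected by filterMap into a set and sorted.
import Mathlib
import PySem

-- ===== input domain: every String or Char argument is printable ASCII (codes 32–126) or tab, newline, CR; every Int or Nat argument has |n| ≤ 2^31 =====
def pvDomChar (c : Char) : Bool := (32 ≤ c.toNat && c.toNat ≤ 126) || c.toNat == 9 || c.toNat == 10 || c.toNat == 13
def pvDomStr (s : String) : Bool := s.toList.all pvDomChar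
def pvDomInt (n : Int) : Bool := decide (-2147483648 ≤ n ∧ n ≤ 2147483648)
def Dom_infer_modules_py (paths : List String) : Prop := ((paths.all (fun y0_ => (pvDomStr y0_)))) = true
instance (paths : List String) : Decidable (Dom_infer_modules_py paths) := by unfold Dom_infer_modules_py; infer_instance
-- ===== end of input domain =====

-- B replaces A's two sequential scans per path by one helper computing the path's single
-- module name in one left-to-right scan (assembly-or-remembered-fallback), and the
-- idx==-1 last-of-filtered by a first-match scan of the reversed segments (objective: alternative).

-- shared module-level constants of both Python files
def pvSkip : List String :=
  ["dev", "core", "rel", "src", "bin", "obj",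
   "properties", "packages", "debug", "release",
   "libraries", "tests", "tools", "setup", "scripts",
   "thirdparty", "third_party", "externals", "shared",
   "foundation", "common", "platform",
   "jquery", "jqueryui", "angular", "angularjs", "bootstrap", "react",
   "knockout", "lodash", "underscore", "moment", "mustache", "handlebars",
   "backbone", "ember", "vue", "polymer", "vendor", "bower_components",
   "infragistics", "telerik", "devexpress", "kendo", "syncfusion",
   "artifacts", "generated", "migrations", "dist", "build", "output"]

def pvSkipSet : PySem.Set String := PySem.Set.ofList pvSkip

def pvNsPrefixes : List String := ["Hyland.", "OnBase.", "hyland.", "onbase."]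

-- the endswith tuple of pass 1/pass 2 (with ".txt")
def pvExts : List String :=
  [".cs", ".xml", ".config", ".sln", ".csproj", ".json", ".md", ".txt", ".resx"]

-- the endswith tuple of the idx==-1 fallback (no ".txt")
def pvFbExts : List String :=
  [".cs", ".xml", ".config", ".sln", ".csproj", ".json", ".md", ".resx"]

-- s.endswith(tuple)
def pvEndsAny (s : String) (ts : List String) : Bool := ts.any (fun t => PySem.Str.endswith s t)

-- the comprehension filter 'if s and not s.lower().endswith(...)' of the idx==-1 branch
def pvKeep (s : String) : Bool := !(s == "") && !(pvEndsAny (PySem.Str.lower s) pvFbExts)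

-- '[s for s in normalized[idx+11:].split("/") if s]' (identical in both sources)
def pvSegs (normalized : String) (idx : Int) : List String :=
  ((PySem.Str.split? (PySem.Str.slice normalized (some (idx + 11)) none) "/").getD []).filter
    (fun s => !(s == ""))

-- ===== PORT A =====

-- _clean_assembly_name: for-loop with break over the prefixes
def pvCleanA : List String → String → String
  | [], name => name
  | p :: rest, name =>
    if PySem.Str.startswith name p then PySem.Str.slice name (some (PySem.Str.len p)) none
    else pvCleanA rest name

-- pass 1: first dotted-namespace assembly segment (the value added, none = no add)
def pvPass1 : List String → Option String
  | [] => none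
  | seg :: rest =>
    if pvEndsAny seg pvExts then none
    else if PySem.Str.isIn "." seg && !PySem.Str.startswith seg "." then
      some (pvCleanA pvNsPrefixes seg)
    else pvPass1 rest

-- pass 2: first non-structural non-file folder (the value added, none = no add)
def pvPass2 : List String → Option String
  | [] => none
  | seg :: rest =>
    if PySem.Set.contains pvSkipSet (PySem.Str.lower seg) then pvPass2 rest
    else if pvEndsAny seg pvExts then none
    else some seg

-- the body of A's 'for path in paths' loop
def pvStepA (mods : PySem.Set String) (path : String) : PySem.Set String :=
  let normalized := PySem.Str.replace path "\\" "/"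
  let idx := PySem.Str.find (PySem.Str.lower normalized) "onbase.net/"
  if idx == -1 then
    let parts := ((PySem.Str.split? normalized "/").getD []).filter pvKeep
    match parts.getLast? with
    | some l => PySem.Set.add mods l
    | none => mods
  else
    let segments := pvSegs normalized idx
    match pvPass1 segments with
    | some a => PySem.Set.add mods a
    | none =>
      match pvPass2 segments with
      | some s => PySem.Set.add mods s
      | none => mods

def infer_modules_py (paths : List String) : List String :=
  PySem.List.sorted (paths.foldl pvStepA PySem.Set.empty) (fun x => x) false

-- ===== PORT B =====

-- _strip_ns
def pvStripNs (name : String) : String :=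
  match pvNsPrefixes.find? (fun p => PySem.Str.startswith name p) with
  | some p => PySem.Str.slice name (some (PySem.Str.len p)) none
  | none => name

-- B's single scan: break on file segment, return assembly, else remember first fallback
def pvScan : List String → Option String → Option String
  | [], fb => fb
  | seg :: rest, fb =>
    if pvEndsAny seg pvExts then fb
    else if PySem.Str.isIn "." seg && !PySem.Str.startswith seg "." then
      some (pvStripNs seg)
    else
      pvScan rest
        (if fb.isNone && !(PySem.Set.contains pvSkipSet (PySem.Str.lower seg)) then some seg
         else fb)

-- _module_of
def pvModuleOf (path : String) : Option String :=
  let normalized := PySem.Str.replace path "\\" "/"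
  let idx := PySem.Str.find (PySem.Str.lower normalized) "onbase.net/"
  if idx == -1 then
    (((PySem.Str.split? normalized "/").getD []).reverse).find? pvKeep
  else
    pvScan (pvSegs normalized idx) none

def infer_modules_py_alt (paths : List String) : List String :=
  PySem.List.sorted (PySem.Set.ofList (paths.filterMap pvModuleOf)) (fun x => x) false

-- ===== PRECONDITION & SPEC =====
def Spec_infer_modules_py (paths : List String) (out : List String) : Prop := out = infer_modules_py_alt paths
instance (paths : List String) (out : List String) : Decidable (Spec_infer_modules_py paths out) := by unfold Spec_infer_modules_py; infer_instance

-- ===== CLAIM (what is proved, stated in full; the proofs are below) =====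
def Claim_equal_infer_modules_py : Prop := ∀ (paths : List String), Dom_infer_modules_py paths → Spec_infer_modules_py paths (infer_modules_py paths)

-- ===== LEMMAS AND PROOFS =====

theorem pvClean_eq (ps : List String) (name : String) :
    pvCleanA ps name =
      (match ps.find? (fun p => PySem.Str.startswith name p) with
       | some p => PySem.Str.slice name (some (PySem.Str.len p)) none
       | none => name) := by
  induction ps with
  | nil => rfl
  | cons p rest ih =>
    by_cases h : PySem.Chars.startswith name.toList p.toList = true
    · simp [pvCleanA, h]
    · simp only [Bool.not_eq_true] at h
      simp [pvCleanA, h, ih]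
theorem pvLower_endsAny (s : String) (h : pvEndsAny s pvExts = true) :
    pvEndsAny (PySem.Str.lower s) pvExts = true := by
  simp only [pvEndsAny, List.any_eq_true] at h ⊢
  obtain ⟨t, ht, he⟩ := h
  refine ⟨t, ht, ?_⟩
  rw [PySem.Str.endswith_eq] at he ⊢
  rw [PySem.Chars.endswith_iff] at he ⊢
  have hmap : t.toList.map PySem.Chars.lowerChar <:+ s.toList.map PySem.Chars.lowerChar :=
    List.IsSuffix.map _ he
  have hlower : (PySem.Str.lower s).toList = s.toList.map PySem.Chars.lowerChar := by
    rw [PySem.Str.toList_lower]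
    induction s.toList with
    | nil => rfl
    | cons c cs ih => rw [List.map_cons, ← ih]; rfl
  have htfix : t.toList.map PySem.Chars.lowerChar = t.toList := by
    fin_cases ht <;> decide
  rw [hlower, ← htfix]
  exact hmap

theorem pvSkip_not_ext (s : String) (h : PySem.Str.lower s ∈ pvSkipSet) :
    pvEndsAny s pvExts = false := by
  have hmem : PySem.Str.lower s ∈ pvSkip := by
    simpa [pvSkipSet, PySem.Set.mem_ofList] using h
  by_contra hne
  simp only [Bool.not_eq_false] at hne
  have hlow := pvLower_endsAny s hne
  have hall : pvSkip.all (fun l => !pvEndsAny l pvExts) = true := by decide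
  rw [List.all_eq_true] at hall
  have := hall _ hmem
  rw [hlow] at this
  exact Bool.noConfusion this
theorem pvScan_eq (segs : List String) (fb : Option String) :
    pvScan segs fb =
      (match pvPass1 segs with
       | some a => some a
       | none =>
         match fb with
         | some f => some f
         | none => pvPass2 segs) := by
  induction segs generalizing fb with
  | nil => cases fb <;> rfl
  | cons seg rest ih =>
    by_cases hext : pvEndsAny seg pvExts = true
    · have hskip : ¬ (PySem.Str.lower seg ∈ pvSkipSet) := by
        intro hc
        rw [pvSkip_not_ext seg hc] at hext
        exact Bool.noConfusion hext
      cases fb <;> simp [pvScan, pvPass1, pvPass2, hext, hskip]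
    · simp only [Bool.not_eq_true] at hext
      by_cases hdot : PySem.Chars.isIn ['.'] seg.toList = true ∧ PySem.Chars.startswith seg.toList ['.'] = false
      · simp [pvScan, pvPass1, hext, hdot, pvStripNs, pvClean_eq]
      · by_cases hskip : PySem.Str.lower seg ∈ pvSkipSet
        · cases fb <;> simp [pvScan, pvPass1, pvPass2, hext, hdot, hskip, ih]
        · cases fb <;> simp [pvScan, pvPass1, pvPass2, hext, hdot, hskip, ih]
theorem pvFind?_eq_head?_filter {α : Type} (p : α → Bool) (l : List α) :
    l.find? p = (l.filter p).head? := by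
  induction l with
  | nil => rfl
  | cons x xs ih =>
    by_cases h : p x = true
    · rw [List.find?_cons_of_pos h, List.filter_cons_of_pos h, List.head?_cons]
    · simp only [Bool.not_eq_true] at h
      rw [List.find?_cons_of_neg (by simp [h]), List.filter_cons_of_neg (by simp [h]), ih]

theorem pvGetLast?_filter {α : Type} (p : α → Bool) (l : List α) :
    (l.filter p).getLast? = l.reverse.find? p := by
  rw [List.getLast?_eq_head?_reverse, ← List.filter_reverse, pvFind?_eq_head?_filter]

theorem pvStep_eq (mods : PySem.Set String) (path : String) :
    pvStepA mods path =
      (match pvModuleOf path with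
       | some m => PySem.Set.add mods m
       | none => mods) := by
  simp only [pvStepA, pvModuleOf]
  generalize (PySem.Str.replace path "\\" "/") = normalized
  generalize hidx : (PySem.Str.find (PySem.Str.lower normalized) "onbase.net/") = idx
  by_cases h : (idx == -1) = true
  · rw [if_pos h, if_pos h, ← pvGetLast?_filter]
  · rw [if_neg h, if_neg h, pvScan_eq]
    generalize pvPass1 (pvSegs normalized idx) = o1
    cases o1 with
    | some a => rfl
    | none =>
      generalize pvPass2 (pvSegs normalized idx) = o2
      cases o2 <;> rfl


theorem pvFold_eq (paths : List String) (s : PySem.Set String) :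
    paths.foldl pvStepA s = (paths.filterMap pvModuleOf).foldl PySem.Set.add s := by
  induction paths generalizing s with
  | nil => rw [List.filterMap_nil, List.foldl_nil, List.foldl_nil]
  | cons p rest ih =>
    rw [List.foldl_cons, List.filterMap_cons, pvStep_eq]
    cases h : pvModuleOf p with
    | some m => rw [List.foldl_cons, ih]
    | none => rw [ih]

-- ===== VERDICT (by name: the statement is the Claim_ definition above) =====
theorem infer_modules_py_spec : Claim_equal_infer_modules_py := by
  intro paths _
  unfold Spec_infer_modules_py infer_modules_py infer_modules_py_alt
  rw [PySem.Set.ofList_eq_foldl, ← pvFold_eq]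
  rfl
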